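-- pv_equiv track=rewrite | github.com/VivianePons/zeta_areaseq | areaseq_zeta.py | last_position
-- ===== SOURCE A (Python) =====
-- def last_position(seq):
--     amax = -1
--     imax = -1
--     inline = False
--
--     #finding the last entry
--     #it is one with maximal area
--     #and on the left end of the right most group with this value
--     for i in range(len(seq)-1,-1,-1):
--         n = seq[i]
--         if n == amax and inline:
--             imax = i
--         elif n > amax:
--             amax = n
--             imax = i
--             inline = True
--         else:
--             inline = False
--
--     return imax
-- ===== SOURCE B (Python) =====
-- def last_position(seq):
--     # pass 1: maximal value with the -1 baseline (values <= -1 never count)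
--     m = -1
--     for x in seq:
--         if x > m:
--             m = x
--     if m == -1:
--         return -1
--     # pass 2: forward scan tracking the start of the current run of m;
--     # the answer is the start of the last such run
--     ans = -1
--     run_start = -1
--     for i, x in enumerate(seq):
--         if x == m:
--             if run_start < 0:
--                 run_start = i
--             ans = run_start
--         else:
--             run_start = -1
--     return ans
-- ===== Notes on version B (the rewrite author's own statement) =====
-- stated objective: alternative
-- what changed: Replaces A's single fused backward state machine (index loop with amax/imax/inline flags) by two forward passes: first compute the maximum with the -1 baseline, then a forward run-tracking scan that records the start of the last run equal to that maximum.
import Mathlib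
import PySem

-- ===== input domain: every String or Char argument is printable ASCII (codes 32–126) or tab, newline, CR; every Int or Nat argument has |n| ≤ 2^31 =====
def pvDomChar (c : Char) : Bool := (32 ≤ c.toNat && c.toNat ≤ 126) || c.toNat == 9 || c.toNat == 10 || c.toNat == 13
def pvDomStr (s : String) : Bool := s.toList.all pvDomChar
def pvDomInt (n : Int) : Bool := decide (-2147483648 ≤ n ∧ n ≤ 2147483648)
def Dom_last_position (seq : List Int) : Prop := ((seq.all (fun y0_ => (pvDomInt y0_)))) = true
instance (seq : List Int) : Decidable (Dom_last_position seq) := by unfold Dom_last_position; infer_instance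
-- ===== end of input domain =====

-- B replaces A's fused backward state machine by two forward passes (max, then run tracking); alternative decomposition, same O(n) cost.

-- ===== PORT A =====
-- loop body of A's backward index loop, named for the proofs; state = (amax, imax, inline)
def lastposStepA (seq : List Int) (s : Int × Int × Bool) (i : Int) : Int × Int × Bool :=
  let n := PySem.List.pyGetD seq i 0
  if n = s.1 ∧ s.2.2 then (s.1, i, s.2.2)
  else if n > s.1 then (n, i, true)
  else (s.1, s.2.1, false)

def last_position (seq : List Int) : Int :=
  ((PySem.List.pyRange ((seq.length : Int) - 1) (-1) (-1)).foldl
      (lastposStepA seq) (-1, -1, false)).2.1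

-- ===== PORT B =====
-- loop body of B's second (enumerate) loop; state = (ans, run_start), p = (i, x)
def lastposStepB (m : Int) (s : Int × Int) (p : Int × Int) : Int × Int :=
  if p.2 = m then
    let rs := if s.2 < 0 then p.1 else s.2
    (rs, rs)
  else (s.1, -1)

def last_position_alt (seq : List Int) : Int :=
  let m := seq.foldl (fun acc x => if x > acc then x else acc) (-1)
  if m = -1 then -1
  else ((PySem.List.enumerate seq).foldl (lastposStepB m) (-1, -1)).1

-- ===== PRECONDITION & SPEC =====
def Spec_last_position (seq : List Int) (out : Int) : Prop := out = last_position_alt seq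
instance (seq : List Int) (out : Int) : Decidable (Spec_last_position seq out) := by unfold Spec_last_position; infer_instance

-- ===== CLAIM (what is proved, stated in full; the proofs are below) =====
def Claim_equal_last_position : Prop := ∀ (seq : List Int), Dom_last_position seq → Spec_last_position seq (last_position seq)

-- ===== LEMMAS AND PROOFS =====

-- common right-to-left specification: G seq = (max with -1 baseline, left end of the rightmost maximal run, or -1)
def G : List Int → Int × Int
  | [] => (-1, -1)
  | x :: xs =>
    let s := G xs
    if x > s.1 then (x, 0)
    else if x = s.1 ∧ s.2 = 0 then (s.1, 0)
    else (s.1, if s.2 < 0 then s.2 else s.2 + 1)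

-- A's machine as structural recursion (indices relative to the current list)
def FA : List Int → Int × Int × Bool
  | [] => (-1, -1, false)
  | x :: xs =>
    let s := FA xs
    if x = s.1 ∧ s.2.2 then (s.1, 0, s.2.2)
    else if x > s.1 then (x, 0, true)
    else (s.1, if s.2.1 < 0 then s.2.1 else s.2.1 + 1, false)

def pvShift (s : Int × Int × Bool) : Int × Int × Bool :=
  (s.1, if s.2.1 < 0 then s.2.1 else s.2.1 + 1, s.2.2)

theorem pyGetD_cons_succ (x : Int) (xs : List Int) (i : Int) (hi : 0 ≤ i) (d : Int) :
    PySem.List.pyGetD (x :: xs) (i + 1) d = PySem.List.pyGetD xs i d := by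
  have h1 : i = ((i.toNat : Nat) : Int) := by omega
  have h2 : i + 1 = ((i.toNat + 1 : Nat) : Int) := by omega
  rw [h2, h1, PySem.List.pyGetD_natCast, PySem.List.pyGetD_natCast]
  rfl

theorem stepA_shift (x : Int) (xs : List Int) (s : Int × Int × Bool) (i : Int) (hi : 0 ≤ i) :
    lastposStepA (x :: xs) (pvShift s) (i + 1) = pvShift (lastposStepA xs s i) := by
  simp only [lastposStepA, pvShift, pyGetD_cons_succ x xs i hi]
  split_ifs <;> simp_all <;> omega

theorem fold_shift (x : Int) (xs : List Int) (L : List Int) (hL : ∀ i ∈ L, 0 ≤ i)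
    (s : Int × Int × Bool) :
    (L.map (· + 1)).foldl (lastposStepA (x :: xs)) (pvShift s)
      = pvShift (L.foldl (lastposStepA xs) s) := by
  induction L generalizing s with
  | nil => rfl
  | cons a t ih =>
    simp only [List.map_cons, List.foldl_cons]
    rw [stepA_shift x xs s a (hL a (by simp)), ih (fun i hi => hL i (by simp [hi]))]

theorem idx_decomp (n : Nat) :
    PySem.List.pyRange (((n + 1 : Nat) : Int) - 1) (-1) (-1)
      = (PySem.List.pyRange ((n : Int) - 1) (-1) (-1)).map (· + 1) ++ [0] := by
  rw [PySem.List.pyRange_neg_one, PySem.List.pyRange_neg_one]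
  have h1 : (((n + 1 : Nat) : Int) - 1 - (-1)).toNat = n + 1 := by omega
  have h2 : (((n : Nat) : Int) - 1 - (-1)).toNat = n := by omega
  rw [h1, h2, List.range_succ, List.map_append, List.map_map]
  congr 1
  · exact List.map_congr_left (fun k hk => by
      simp only [List.mem_range] at hk
      simp only [Function.comp]
      omega)
  · simp

theorem A_loop (seq : List Int) :
    (PySem.List.pyRange ((seq.length : Int) - 1) (-1) (-1)).foldl
      (lastposStepA seq) (-1, -1, false) = FA seq := by
  induction seq with
  | nil =>
    rw [PySem.List.pyRange_neg_one_eq_nil (by simp)]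
    rfl
  | cons x xs ih =>
    have hlen : ((x :: xs).length : Int) - 1 = (((xs.length + 1 : Nat) : Int)) - 1 := by
      simp
    rw [hlen, idx_decomp xs.length, List.foldl_append]
    have hmem : ∀ i ∈ PySem.List.pyRange ((xs.length : Int) - 1) (-1) (-1), 0 ≤ i := by
      intro i hi
      have := (PySem.List.mem_pyRange_neg_one.mp hi).1
      omega
    have hinit : ((-1 : Int), (-1 : Int), false) = pvShift (-1, -1, false) := by
      simp [pvShift]
    rw [hinit, fold_shift x xs _ hmem, ih]
    simp only [List.foldl_cons, List.foldl_nil, lastposStepA, FA, pvShift,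
      PySem.List.pyGetD_zero_cons]

-- invariants of G: 1st component ≥ -1, 2nd ≥ -1, and 2nd ≥ 0 ↔ 1st > -1
theorem G_inv (xs : List Int) :
    -1 ≤ (G xs).1 ∧ -1 ≤ (G xs).2 ∧ (0 ≤ (G xs).2 → -1 < (G xs).1) ∧ (-1 < (G xs).1 → 0 ≤ (G xs).2) := by
  induction xs with
  | nil => simp [G]
  | cons x t ih =>
    simp only [G]
    split_ifs <;> dsimp only <;> omega

theorem FA_G (xs : List Int) :
    FA xs = ((G xs).1, (G xs).2, decide ((G xs).2 = 0 ∧ -1 < (G xs).1)) := by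
  induction xs with
  | nil => simp [FA, G]
  | cons x t ih =>
    have hinv := G_inv t
    simp only [FA, G, ih]
    split_ifs with h1 h2 h3 h4 h5 h6 <;> simp_all <;> omega

-- every element is at most the running maximum
theorem mem_le_G (xs : List Int) (y : Int) (hy : y ∈ xs) : y ≤ (G xs).1 := by
  induction xs with
  | nil => simp at hy
  | cons x t ih =>
    simp only [G]
    rcases List.mem_cons.mp hy with h | h
    · subst h; split_ifs <;> simp <;> omega
    · have := ih h; split_ifs <;> simp <;> omega

-- pass 1 of B computes (G xs).1
theorem maxfold_eq_aux (xs : List Int) (a : Int) (ha : -1 ≤ a) :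
    xs.foldl (fun acc x => if x > acc then x else acc) a
      = if (G xs).1 > a then (G xs).1 else a := by
  induction xs generalizing a with
  | nil => simp [G]; omega
  | cons x t ih =>
    simp only [List.foldl_cons, G]
    rw [ih (if x > a then x else a) (by omega)]
    have := G_inv t
    split_ifs <;> simp_all <;> omega

theorem maxfold_eq (xs : List Int) :
    xs.foldl (fun acc x => if x > acc then x else acc) (-1) = (G xs).1 := by
  rw [maxfold_eq_aux xs (-1) (by omega)]
  have := G_inv xs
  split_ifs <;> omega

-- the enumerate fold over a list containing no occurrence of m leaves ans unchanged
theorem fold_noM (t : List Int) (m : Int) (k : Int) (st : Int × Int)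
    (h : ∀ y ∈ t, y ≠ m) :
    ((PySem.List.enumerate t k).foldl (lastposStepB m) st).1 = st.1 := by
  induction t generalizing k st with
  | nil => rfl
  | cons x t ih =>
    rw [PySem.List.enumerate_cons, List.foldl_cons]
    rw [ih (k + 1) _ (fun y hy => h y (by simp [hy]))]
    simp [lastposStepB, h x (by simp)]

-- main characterisation of B's second pass
theorem fold_main (t : List Int) (k : Int) (st : Int × Int) (hk : 0 ≤ k)
    (hm : -1 < (G t).1) :
    ((PySem.List.enumerate t k).foldl (lastposStepB (G t).1) st).1
      = if (G t).2 = 0 ∧ 0 ≤ st.2 then st.2 else k + (G t).2 := by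
  induction t generalizing k st with
  | nil => simp [G] at hm
  | cons x t ih =>
    have hinv := G_inv t
    rw [PySem.List.enumerate_cons, List.foldl_cons]
    by_cases h1 : x > (G t).1
    · -- new strict maximum: (G (x::t)).1 = x, no element of t equals x
      have hG : G (x :: t) = (x, 0) := by simp only [G]; rw [if_pos h1]
      rw [hG]
      have hnm : ∀ y ∈ t, y ≠ x := fun y hy => by have := mem_le_G t y hy; omega
      rw [fold_noM t x (k + 1) _ hnm]
      simp [lastposStepB]
      split_ifs <;> omega
    · have hfst : (G (x :: t)).1 = (G t).1 := by
        simp only [G]; split_ifs <;> rfl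
      have hmt : -1 < (G t).1 := by
        have : (G (x :: t)).1 > -1 := hm
        rw [hfst] at this; exact this
      rw [hfst]
      by_cases h2 : x = (G t).1
      · -- x equals the (unchanged) maximum
        have hstep : lastposStepB (G t).1 st (k, x) = ((if st.2 < 0 then k else st.2), (if st.2 < 0 then k else st.2)) := by
          simp [lastposStepB, h2]
        rw [hstep, ih (k + 1) _ (by omega) hmt]
        by_cases h3 : (G t).2 = 0
        · have hG : (G (x :: t)).2 = 0 := by
            simp only [G]; rw [if_neg h1, if_pos ⟨h2, h3⟩]
          rw [hG]
          split_ifs <;> simp_all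
          omega
        · have hG : (G (x :: t)).2 = (G t).2 + 1 := by
            simp only [G]; rw [if_neg h1, if_neg (by tauto)]
            simp only; omega
          rw [hG]
          split_ifs <;> simp_all <;> omega
      · -- x differs from the maximum: run resets
        have hstep : lastposStepB (G t).1 st (k, x) = (st.1, -1) := by
          simp [lastposStepB, h2]
        have hG : (G (x :: t)).2 = (G t).2 + 1 := by
          simp only [G]; rw [if_neg h1, if_neg (by tauto)]
          simp only; omega
        rw [hstep, ih (k + 1) _ (by omega) hmt, hG]
        split_ifs <;> simp_all <;> omega

theorem A_eq (seq : List Int) : last_position seq = (G seq).2 := by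
  unfold last_position
  rw [A_loop, FA_G]

theorem B_eq (seq : List Int) : last_position_alt seq = (G seq).2 := by
  unfold last_position_alt
  simp only [maxfold_eq]
  have hinv := G_inv seq
  by_cases h : (G seq).1 = -1
  · rw [if_pos h]; omega
  · rw [if_neg h]
    have hm : -1 < (G seq).1 := by omega
    rw [fold_main seq 0 (-1, -1) (by omega) hm]
    split_ifs <;> simp_all

-- ===== VERDICT (by name: the statement is the Claim_ definition above) =====
theorem last_position_spec : Claim_equal_last_position := by
  intro seq _
  unfold Spec_last_position
  rw [A_eq, B_eq]
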